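-- pv_equiv track=rewrite | github.com/leslie071564/EventCoreference | coref_metrics.py | pairwise_negative
-- ===== SOURCE A (Python) =====
-- import itertools
--
-- values = dict.values
--
-- keys = dict.keys
--
-- def sets_to_mapping(s):
--     """
--     Input: {cluster_name: set([cluster_items])} dictionary
--     Output: {cluster_item: cluster_name} dictionary
--     """
--     return {m: k for k, ms in s.items() for m in ms}
--
-- def _positive_pairs(C):
--     "Return pairs of instances across all clusters in C"
--     return frozenset(itertools.chain.from_iterable(
--         itertools.combinations(sorted(c), 2) for c in C))
--
-- def _triangle(n):
--     return n * (n - 1) // 2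
--
-- def pairwise_negative(true, pred):
--     """Return p_num, p_den, r_num, r_den over noncoreferent item pairs
--
--     As used in calcualting BLANC (see Luo, Pradhan, Recasens and Hovy (2014).
--
--     >>> pairwise_negative({1: {'a', 'b', 'c'}, 2: {'d'}},
--     ...                   {1: {'b', 'c'}, 2: {'d', 'e'}})
--     (2, 4, 2, 3)
--     """
--     true_pairs = _positive_pairs(values(true))
--     pred_pairs = _positive_pairs(values(pred))
--     n_pos_agreements = len(true_pairs & pred_pairs)
--
--     true_mapping = sets_to_mapping(true)
--     pred_mapping = sets_to_mapping(pred)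
--     extra_mentions = keys(true_mapping) ^ keys(pred_mapping)
--     disagreements = {p for p in true_pairs ^ pred_pairs
--                      if p[0] not in extra_mentions
--                      and p[1] not in extra_mentions}
--
--     n_common_mentions = len(keys(true_mapping) & keys(pred_mapping))
--     n_neg_agreements = (_triangle(n_common_mentions) - n_pos_agreements -
--                         len(disagreements))
--
--     # Total number of negatives in each of pred and true:
--     p_den = _triangle(len(pred_mapping)) - len(pred_pairs)
--     r_den = _triangle(len(true_mapping)) - len(true_pairs)
--
--     return n_neg_agreements, p_den, n_neg_agreements, r_den
-- ===== SOURCE B (Python) =====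
-- import itertools
--
--
-- def _tri(n):
--     return n * (n - 1) // 2
--
--
-- def _dedup_sorted(pairs):
--     """Sorted list of the distinct elements of a list of pairs."""
--     out = []
--     prev = None
--     for p in sorted(pairs):
--         if p != prev:
--             out.append(p)
--             prev = p
--     return out
--
--
-- def _pair_list(clusters):
--     """Sorted, duplicate-free list of all within-cluster pairs."""
--     buf = []
--     for c in clusters:
--         buf.extend(itertools.combinations(sorted(c), 2))
--     return _dedup_sorted(buf)
--
--
-- def pairwise_negative(true, pred):
--     """Return p_num, p_den, r_num, r_den over noncoreferent item pairs."""
--     t_seen = {m: None for ms in true.values() for m in ms}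
--     p_seen = {m: None for ms in pred.values() for m in ms}
--     n_common = sum(1 for m in t_seen if m in p_seen)
--
--     t_pairs = _pair_list(true.values())
--     p_pairs = _pair_list(pred.values())
--     # Pairs linked on either side whose both mentions are common: a common
--     # pair is a negative on both sides iff it is not of this kind, so
--     # n_neg = tri(n_common) - n_linked  (inclusion-exclusion, no pair-set
--     # intersections / symmetric differences needed).
--     n_linked = sum(1 for a, b in _dedup_sorted(t_pairs + p_pairs)
--                    if a in t_seen and a in p_seen
--                    and b in t_seen and b in p_seen)
--
--     n_neg = _tri(n_common) - n_linked
--     p_den = _tri(len(p_seen)) - len(p_pairs)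
--     r_den = _tri(len(t_seen)) - len(t_pairs)
--     return n_neg, p_den, n_neg, r_den
-- ===== Notes on version B (the rewrite author's own statement) =====
-- stated objective: alternative
-- what changed: B drops A's frozenset pair-set algebra entirely: no pair hashing, no & / ^ set operations, no mention-to-cluster-name mappings, no extra_mentions / disagreements sets - it collects each side's within-cluster pairs into one sorted duplicate-free list, takes the union of the two sides as a sorted-dedup of their concatenation, and gets n_neg from the single identity tri(n_common) - #(linked pairs with both mentions common), with mention sets kept as plain presence dicts.
import Mathlib
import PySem

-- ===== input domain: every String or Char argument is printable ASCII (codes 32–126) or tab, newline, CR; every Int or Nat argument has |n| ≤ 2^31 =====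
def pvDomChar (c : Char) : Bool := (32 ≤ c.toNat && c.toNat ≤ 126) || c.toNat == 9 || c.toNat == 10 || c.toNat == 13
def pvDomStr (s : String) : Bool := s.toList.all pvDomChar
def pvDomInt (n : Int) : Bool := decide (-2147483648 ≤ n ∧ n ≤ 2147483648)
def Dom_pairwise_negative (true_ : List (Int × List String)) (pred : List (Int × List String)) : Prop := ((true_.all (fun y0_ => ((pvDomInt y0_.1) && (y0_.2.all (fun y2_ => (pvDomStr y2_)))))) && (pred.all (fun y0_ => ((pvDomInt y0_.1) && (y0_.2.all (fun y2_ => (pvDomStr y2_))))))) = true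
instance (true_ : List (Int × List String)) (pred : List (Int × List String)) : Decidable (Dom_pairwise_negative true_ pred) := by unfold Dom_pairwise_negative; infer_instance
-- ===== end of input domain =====

-- B drops A's frozenset pair-set algebra (no pair hashing, no & / ^, no cluster-name mappings,
-- no extra_mentions / disagreements sets): sorted duplicate-free pair lists and one
-- inclusion-exclusion identity, tri(n_common) - n_linked, give the same four counts.

-- ===== PORT A =====
-- _triangle(n) = n*(n-1)//2  (identical helper in both Source A and Source B; shared by the two ports)
def pvTri (n : Int) : Int := PySem.Int.floordiv (n * (n - 1)) 2

-- itertools.combinations(l, 2), in order  (both Source A and Source B emit pairs this way; shared)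
def pvComb2 : List String → List (String × String)
  | [] => []
  | x :: xs => xs.map (fun y => (x, y)) ++ pvComb2 xs

-- _positive_pairs: frozenset(chain.from_iterable(combinations(sorted(c), 2) for c in C))
def pvPositivePairs (C : List (List String)) : PySem.Set (String × String) :=
  PySem.Set.ofList (C.flatMap (fun c => pvComb2 (PySem.List.sorted c (fun x => x) false)))

-- sets_to_mapping: {m: k for k, ms in s.items() for m in ms}
def pvSetsToMapping (s : List (Int × List String)) : PySem.Dict String Int :=
  s.foldl (fun d p => p.2.foldl (fun d m => d.insert m p.1) d) PySem.Dict.empty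

def pairwise_negative (true_ : List (Int × List String)) (pred : List (Int × List String)) : Int × Int × Int × Int :=
  let true_pairs := pvPositivePairs (true_.map (·.2))
  let pred_pairs := pvPositivePairs (pred.map (·.2))
  let n_pos : Int := ((PySem.Set.inter true_pairs pred_pairs).length : Int)
  let true_mapping := pvSetsToMapping true_
  let pred_mapping := pvSetsToMapping pred
  let extra := PySem.Set.symmDiff true_mapping.keys pred_mapping.keys
  let disagreements := PySem.Set.ofList ((PySem.Set.symmDiff true_pairs pred_pairs).filter
      (fun p => !(PySem.Set.contains extra p.1) && !(PySem.Set.contains extra p.2)))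
  let n_common : Int := ((PySem.Set.inter true_mapping.keys pred_mapping.keys).length : Int)
  let n_neg := pvTri n_common - n_pos - (disagreements.length : Int)
  let p_den := pvTri (pred_mapping.size : Int) - (pred_pairs.length : Int)
  let r_den := pvTri (true_mapping.size : Int) - (true_pairs.length : Int)
  (n_neg, p_den, n_neg, r_den)

-- ===== PORT B =====
-- _dedup_sorted: sort (Python's tuple order = sorted2 on the two components), then keep each
-- element when it differs from the previous one
def pvDedupSorted (pairs : List (String × String)) : List (String × String) :=
  ((PySem.List.sorted2 pairs (·.1) (·.2)).foldl
    (fun (st : List (String × String) × Option (String × String)) p =>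
      if some p == st.2 then st else (st.1 ++ [p], some p))
    ([], none)).1

-- _pair_list: buf.extend(itertools.combinations(sorted(c), 2)) per cluster, then _dedup_sorted
def pvPairList (C : List (List String)) : List (String × String) :=
  pvDedupSorted (C.flatMap (fun c => pvComb2 (PySem.List.sorted c (fun x => x) false)))

-- {m: None for ms in d.values() for m in ms}
def pvSeen (s : List (Int × List String)) : PySem.Dict String (Option Unit) :=
  s.foldl (fun d p => p.2.foldl (fun d m => d.insert m none) d) PySem.Dict.empty

def pairwise_negative_alt (true_ : List (Int × List String)) (pred : List (Int × List String)) : Int × Int × Int × Int :=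
  let t_seen := pvSeen true_
  let p_seen := pvSeen pred
  -- sum(1 for m in t_seen if m in p_seen)
  let n_common : Int := ((t_seen.keys.countP (fun m => p_seen.contains m) : Nat) : Int)
  let t_pairs := pvPairList (true_.map (·.2))
  let p_pairs := pvPairList (pred.map (·.2))
  let n_linked : Int := (((pvDedupSorted (t_pairs ++ p_pairs)).countP
      (fun q => t_seen.contains q.1 && p_seen.contains q.1 &&
                t_seen.contains q.2 && p_seen.contains q.2) : Nat) : Int)
  let n_neg := pvTri n_common - n_linked
  let p_den := pvTri ((p_seen.size : Nat) : Int) - ((p_pairs.length : Nat) : Int)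
  let r_den := pvTri ((t_seen.size : Nat) : Int) - ((t_pairs.length : Nat) : Int)
  (n_neg, p_den, n_neg, r_den)

-- ===== PRECONDITION & SPEC =====
-- Pre_ only requires each cluster list to be duplicate-free: the Python arguments are dicts of
-- SETS, and a List String encodes a Python set exactly when its elements are distinct.
def Pre_pairwise_negative (true_ : List (Int × List String)) (pred : List (Int × List String)) : Prop :=
  (∀ p ∈ true_, (p.2 : List String).Nodup) ∧ (∀ p ∈ pred, (p.2 : List String).Nodup)
instance (true_ : List (Int × List String)) (pred : List (Int × List String)) : Decidable (Pre_pairwise_negative true_ pred) := by unfold Pre_pairwise_negative; infer_instance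

def pvWitness_pairwise_negative : (List (Int × List String)) × (List (Int × List String)) :=
  ([(1, ["a", "b", "c"]), (2, ["d"])], [(1, ["b", "c"]), (2, ["d", "e"])])

def Spec_pairwise_negative (true_ : List (Int × List String)) (pred : List (Int × List String)) (out : Int × Int × Int × Int) : Prop := out = pairwise_negative_alt true_ pred
instance (true_ : List (Int × List String)) (pred : List (Int × List String)) (out : Int × Int × Int × Int) : Decidable (Spec_pairwise_negative true_ pred out) := by unfold Spec_pairwise_negative; infer_instance

-- ===== CLAIM (what is proved, stated in full; the proofs are below) =====
def Claim_equal_pairwise_negative : Prop := ∀ (true_ : List (Int × List String)) (pred : List (Int × List String)), Dom_pairwise_negative true_ pred → Pre_pairwise_negative true_ pred → Spec_pairwise_negative true_ pred (pairwise_negative true_ pred)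

-- ===== LEMMAS AND PROOFS =====

-- ---- the strict lexicographic order sorted2 uses on pairs, and its order facts ----
def pvBlex (a b : String × String) : Bool :=
  decide (a.1 < b.1) || (!decide (b.1 < a.1) && decide (a.2 < b.2))

theorem pv_blex_irrefl (a : String × String) : pvBlex a a = false := by
  simp [pvBlex]

theorem pv_blex_trans {a b c : String × String}
    (h1 : pvBlex a b = true) (h2 : pvBlex b c = true) : pvBlex a c = true := by
  simp only [pvBlex, Bool.or_eq_true, Bool.and_eq_true, decide_eq_true_eq,
    Bool.not_eq_true', decide_eq_false_iff_not] at *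
  rcases h1 with h1 | ⟨h1a, h1b⟩ <;> rcases h2 with h2 | ⟨h2a, h2b⟩
  · exact Or.inl (h1.trans h2)
  · exact Or.inl (lt_of_lt_of_le h1 (not_lt.mp h2a))
  · exact Or.inl (lt_of_le_of_lt (not_lt.mp h1a) h2)
  · exact Or.inr ⟨fun hc => h1a (lt_of_le_of_lt (not_lt.mp h2a) hc), h1b.trans h2b⟩

theorem pv_blex_asymm {a b : String × String} (h : pvBlex a b = true) : pvBlex b a = false := by
  by_contra hc
  rw [Bool.not_eq_false] at hc
  have := pv_blex_trans h hc
  rw [pv_blex_irrefl a] at this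
  exact Bool.false_ne_true this

theorem pv_blex_antisymm {a b : String × String}
    (h1 : pvBlex a b = false) (h2 : pvBlex b a = false) : a = b := by
  simp only [pvBlex, Bool.or_eq_false_iff, Bool.and_eq_false_iff, decide_eq_false_iff_not,
    Bool.not_eq_false', decide_eq_true_eq] at h1 h2
  obtain ⟨h1a, h1b⟩ := h1
  obtain ⟨h2a, h2b⟩ := h2
  have hfst : a.1 = b.1 := le_antisymm (not_lt.mp h2a) (not_lt.mp h1a)
  have hsnd : a.2 = b.2 := by
    rcases h1b with h | h
    · exact absurd (hfst ▸ h) (lt_irrefl b.1)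
    · rcases h2b with h' | h'
      · exact absurd (hfst ▸ h') (lt_irrefl b.1)
      · exact le_antisymm (not_lt.mp h') (not_lt.mp h)
  exact Prod.ext hfst hsnd

-- pvLe a b: a may precede b in a sorted list
def pvLe (a b : String × String) : Prop := pvBlex b a = false

theorem pv_insertBy_pairwise (x : String × String) : ∀ (ys : List (String × String)),
    ys.Pairwise pvLe → (PySem.List.insertBy pvBlex x ys).Pairwise pvLe
  | [], _ => by simp [PySem.List.insertBy, pvLe, pv_blex_irrefl]
  | y :: ys, h => by
    obtain ⟨hy, hys⟩ := List.pairwise_cons.mp h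
    show (if pvBlex x y = true then x :: y :: ys else y :: PySem.List.insertBy pvBlex x ys).Pairwise pvLe
    by_cases hxy : pvBlex x y = true
    · rw [if_pos hxy]
      refine List.pairwise_cons.mpr ⟨?_, h⟩
      intro z hz
      rcases List.mem_cons.mp hz with rfl | hz'
      · exact pv_blex_asymm hxy
      · show pvBlex z x = false
        by_contra hc
        rw [Bool.not_eq_false] at hc
        have hzy : pvBlex z y = true := pv_blex_trans hc hxy
        have := hy z hz'
        rw [pvLe] at this
        rw [this] at hzy
        exact Bool.false_ne_true hzy
    · rw [if_neg hxy]
      refine List.pairwise_cons.mpr ⟨?_, pv_insertBy_pairwise x ys hys⟩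
      intro z hz
      rcases (PySem.List.mem_insertBy pvBlex x z ys).mp hz with rfl | hz'
      · show pvBlex z y = false
        exact Bool.eq_false_iff.mpr hxy
      · exact hy z hz'

theorem pv_sorted2_pairwise (xs : List (String × String)) :
    (PySem.List.sorted2 xs (·.1) (·.2) false).Pairwise pvLe := by
  show (xs.foldl (fun acc x => PySem.List.insertBy pvBlex x acc) []).Pairwise pvLe
  have hgen : ∀ (l acc : List (String × String)), acc.Pairwise pvLe →
      (l.foldl (fun acc x => PySem.List.insertBy pvBlex x acc) acc).Pairwise pvLe := by
    intro l
    induction l with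
    | nil => exact fun acc h => h
    | cons x l ih => exact fun acc h => ih _ (pv_insertBy_pairwise x acc h)
  exact hgen xs [] List.Pairwise.nil

-- every element of a pvLe-sorted list is pvLe its last element
theorem pv_le_getLast : ∀ (out : List (String × String)), out.Pairwise pvLe →
    ∀ a ∈ out, ∀ l, out.getLast? = some l → pvLe a l
  | [], _, a, ha, _, _ => absurd ha (List.not_mem_nil)
  | b :: rest, h, a, ha, l, hl => by
    obtain ⟨hb, hrest⟩ := List.pairwise_cons.mp h
    cases rest with
    | nil =>
      simp only [List.getLast?_singleton, Option.some.injEq] at hl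
      rcases List.mem_singleton.mp ha with rfl
      rw [← hl]
      exact pv_blex_irrefl a
    | cons c rest' =>
      have hl' : (c :: rest').getLast? = some l := by
        rwa [List.getLast?_cons_cons] at hl
      rcases List.mem_cons.mp ha with rfl | ha'
      · exact hb l (List.mem_of_getLast? hl')
      · exact pv_le_getLast (c :: rest') hrest a ha' l hl'

-- the dedup fold over a pvLe-sorted list: distinct elements, same membership
theorem pv_dedup_fold : ∀ (xs out : List (String × String)),
    out.Nodup → (out ++ xs).Pairwise pvLe →
    ((xs.foldl (fun st p => if some p == st.2 then st else (st.1 ++ [p], some p))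
        (out, out.getLast?)).1.Nodup
      ∧ ∀ y, y ∈ (xs.foldl (fun st p => if some p == st.2 then st else (st.1 ++ [p], some p))
          (out, out.getLast?)).1 ↔ y ∈ out ∨ y ∈ xs)
  | [], out, hnd, _ => by simp [hnd]
  | p :: xs, out, hnd, hpw => by
    rw [List.foldl_cons]
    by_cases hlast : (some p == out.getLast?) = true
    · rw [if_pos hlast]
      have hpmem : p ∈ out := by
        rw [beq_iff_eq] at hlast
        exact List.mem_of_getLast? hlast.symm
      have hpw' : (out ++ xs).Pairwise pvLe := by
        refine List.Pairwise.sublist ?_ hpw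
        exact List.Sublist.append_left (List.sublist_cons_self p xs) out
      obtain ⟨h1, h2⟩ := pv_dedup_fold xs out hnd hpw'
      refine ⟨h1, fun y => ?_⟩
      rw [h2 y, List.mem_cons]
      constructor
      · rintro (h | h)
        · exact Or.inl h
        · exact Or.inr (Or.inr h)
      · rintro (h | rfl | h)
        · exact Or.inl h
        · exact Or.inl hpmem
        · exact Or.inr h
    · rw [if_neg hlast]
      have hout : out.Pairwise pvLe := by
        refine List.Pairwise.sublist (List.sublist_append_left out (p :: xs)) hpw
      have hpnot : p ∉ out := by
        intro hpin
        have h1 : ∀ l, out.getLast? = some l → pvLe p l := fun l hl =>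
          pv_le_getLast out hout p hpin l hl
        obtain ⟨l, hl⟩ : ∃ l, out.getLast? = some l :=
          Option.isSome_iff_exists.mp
            (by rw [List.getLast?_isSome]; exact List.ne_nil_of_mem hpin)
        have hlp : pvLe l p :=
          (List.pairwise_append.mp hpw).2.2 l (List.mem_of_getLast? hl) p
            (List.mem_cons_self ..)
        have : p = l := pv_blex_antisymm hlp (h1 l hl)
        rw [beq_iff_eq] at hlast
        exact hlast (this ▸ hl.symm)
      have hnd' : (out ++ [p]).Nodup := by
        rw [List.nodup_append]
        exact ⟨hnd, List.nodup_singleton p, by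
          intro a ha b hb
          rw [List.mem_singleton] at hb
          subst hb
          exact fun hab => hpnot (hab ▸ ha)⟩
      have hpw'' : ((out ++ [p]) ++ xs).Pairwise pvLe := by
        rwa [List.append_assoc, List.singleton_append]
      have hlast' : (out ++ [p]).getLast? = some p := by
        rw [List.getLast?_append]
        simp
      obtain ⟨h1, h2⟩ := hlast' ▸ pv_dedup_fold xs (out ++ [p]) hnd' hpw''
      refine ⟨h1, fun y => ?_⟩
      rw [h2 y, List.mem_append, List.mem_singleton, List.mem_cons]
      tauto

theorem pv_dedup_nodup (xs : List (String × String)) : (pvDedupSorted xs).Nodup := by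
  have h := (pv_dedup_fold (PySem.List.sorted2 xs (·.1) (·.2) false) [] List.nodup_nil
    (by rw [List.nil_append]; exact pv_sorted2_pairwise xs)).1
  rw [List.getLast?_nil] at h
  exact h

theorem pv_mem_dedup (xs : List (String × String)) (y : String × String) :
    y ∈ pvDedupSorted xs ↔ y ∈ xs := by
  have h := (pv_dedup_fold (PySem.List.sorted2 xs (·.1) (·.2) false) [] List.nodup_nil
    (by rw [List.nil_append]; exact pv_sorted2_pairwise xs)).2 y
  rw [List.getLast?_nil] at h
  rw [pvDedupSorted, h]
  simp only [List.not_mem_nil, false_or]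
  exact (PySem.List.sorted2_perm xs (·.1) (·.2) false).mem_iff

-- ---- A-side pair-set membership ----
theorem pv_sorted_pairwise_lt (c : List String) (hc : c.Nodup) :
    (PySem.List.sorted c (fun x => x) false).Pairwise (· < ·) := by
  have hperm : (PySem.List.sorted c (fun x => x) false).Perm c :=
    PySem.List.sorted_perm c (fun x => x) false
  have hnd : (PySem.List.sorted c (fun x => x) false).Nodup := hperm.nodup_iff.mpr hc
  have hle : (PySem.List.sorted c (fun x => x) false).Pairwise (fun a b => a ≤ b) :=
    PySem.List.sorted_pairwise c (fun x => x)
  exact (hle.and hnd).imp (fun h => lt_of_le_of_ne h.1 h.2)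

theorem pv_mem_comb2 : ∀ (l : List String), l.Pairwise (· < ·) → ∀ q : String × String,
    (q ∈ pvComb2 l ↔ q.1 ∈ l ∧ q.2 ∈ l ∧ q.1 < q.2)
  | [], _, q => by simp [pvComb2]
  | x :: xs, h, q => by
      obtain ⟨hx, hxs⟩ := List.pairwise_cons.mp h
      obtain ⟨q1, q2⟩ := q
      rw [pvComb2]
      simp only [List.mem_append, List.mem_map, pv_mem_comb2 xs hxs, List.mem_cons,
        Prod.mk.injEq]
      constructor
      · rintro (⟨y, hy, rfl, rfl⟩ | ⟨h1, h2, h3⟩)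
        · exact ⟨Or.inl rfl, Or.inr hy, hx y hy⟩
        · exact ⟨Or.inr h1, Or.inr h2, h3⟩
      · rintro ⟨h1 | h1, h2 | h2, hlt⟩
        · subst h1; subst h2; exact absurd hlt (lt_irrefl _)
        · subst h1; exact Or.inl ⟨q2, h2, rfl, rfl⟩
        · subst h2; exact absurd (hlt.trans (hx q1 h1)) (lt_irrefl _)
        · exact Or.inr ⟨h1, h2, hlt⟩

theorem pv_mem_positivePairs (C : List (List String)) (hC : ∀ c ∈ C, c.Nodup) (q : String × String) :
    q ∈ pvPositivePairs C ↔ ∃ c ∈ C, q.1 ∈ c ∧ q.2 ∈ c ∧ q.1 < q.2 := by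
  unfold pvPositivePairs
  rw [PySem.Set.mem_ofList]
  simp only [List.mem_flatMap]
  constructor
  · rintro ⟨c, hc, hq⟩
    have h := (pv_mem_comb2 _ (pv_sorted_pairwise_lt c (hC c hc)) q).mp hq
    refine ⟨c, hc, ?_, ?_, h.2.2⟩
    · simpa [PySem.List.mem_sorted] using h.1
    · simpa [PySem.List.mem_sorted] using h.2.1
  · rintro ⟨c, hc, h1, h2, h3⟩
    refine ⟨c, hc, (pv_mem_comb2 _ (pv_sorted_pairwise_lt c (hC c hc)) q).mpr ?_⟩
    exact ⟨by simpa [PySem.List.mem_sorted] using h1, by simpa [PySem.List.mem_sorted] using h2, h3⟩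

-- ---- the keys of both ports' mention dicts: the distinct mentions, in first-insertion order ----
theorem pv_keys_fold {ν : Type} (f : Int × List String → ν) :
    ∀ (s : List (Int × List String)) (d : PySem.Dict String ν),
    (s.foldl (fun d p => p.2.foldl (fun d m => d.insert m (f p)) d) d).keys
      = s.foldl (fun ks p => PySem.Set.update ks p.2) d.keys
  | [], _ => rfl
  | p :: s, d => by
      rw [List.foldl_cons, List.foldl_cons, pv_keys_fold f s,
        PySem.Dict.keys_foldl_insert (f := fun _ _ => f p)]

theorem pv_update_fold : ∀ (s : List (Int × List String)) (acc : PySem.Set String),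
    s.foldl (fun ks p => PySem.Set.update ks p.2) acc = PySem.Set.update acc (s.flatMap (·.2))
  | [], acc => by simp [PySem.Set.update]
  | p :: s, acc => by
      rw [List.foldl_cons, pv_update_fold s, List.flatMap_cons, PySem.Set.update_append]

theorem pv_keys_eq {ν : Type} (f : Int × List String → ν) (s : List (Int × List String)) :
    (s.foldl (fun d p => p.2.foldl (fun d m => d.insert m (f p)) d) PySem.Dict.empty).keys
      = PySem.Set.ofList (s.flatMap (·.2)) := by
  rw [pv_keys_fold f s PySem.Dict.empty, pv_update_fold]
  rw [show (PySem.Dict.empty : PySem.Dict String ν).keys = [] from rfl]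
  exact PySem.Set.update_nil_left _

theorem pv_size_eq_keys_length {ν : Type} (d : PySem.Dict String ν) : d.size = d.keys.length := by
  simp [PySem.Dict.size, PySem.Dict.keys]

-- ---- the counting identity: |T∩P| + |(T△P) off the extra mentions| = |(T∪P) on common mentions| ----
theorem pv_count (TA PA U : List (String × String)) (Mt Mp : List String)
    (hTA : TA.Nodup) (hPA : PA.Nodup) (hU : U.Nodup)
    (hUm : ∀ q, q ∈ U ↔ q ∈ TA ∨ q ∈ PA)
    (fB : String × String → Bool)
    (hfB : ∀ q, fB q = true ↔ (q.1 ∈ Mt ∧ q.1 ∈ Mp ∧ q.2 ∈ Mt ∧ q.2 ∈ Mp))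
    (hTM : ∀ q ∈ TA, q.1 ∈ Mt ∧ q.2 ∈ Mt) (hPM : ∀ q ∈ PA, q.1 ∈ Mp ∧ q.2 ∈ Mp) :
    (PySem.Set.inter TA PA).length
      + ((PySem.Set.symmDiff TA PA).filter
          (fun p => !(PySem.Set.contains (PySem.Set.symmDiff Mt Mp) p.1)
            && !(PySem.Set.contains (PySem.Set.symmDiff Mt Mp) p.2))).length
      = U.countP fB := by
  rw [List.countP_eq_length_filter]
  have hX : (PySem.Set.inter TA PA).Nodup := PySem.Set.nodup_inter TA PA hTA
  have hY : ((PySem.Set.symmDiff TA PA).filter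
      (fun p => !(PySem.Set.contains (PySem.Set.symmDiff Mt Mp) p.1)
        && !(PySem.Set.contains (PySem.Set.symmDiff Mt Mp) p.2))).Nodup :=
    List.Nodup.filter _ (PySem.Set.nodup_symmDiff TA PA hTA hPA)
  have hZ : (U.filter fB).Nodup := List.Nodup.filter _ hU
  rw [← List.toFinset_card_of_nodup hX, ← List.toFinset_card_of_nodup hY,
    ← List.toFinset_card_of_nodup hZ]
  have hdisj : Disjoint
      (PySem.Set.inter TA PA).toFinset
      (((PySem.Set.symmDiff TA PA).filter
        (fun p => !(PySem.Set.contains (PySem.Set.symmDiff Mt Mp) p.1)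
          && !(PySem.Set.contains (PySem.Set.symmDiff Mt Mp) p.2))).toFinset) := by
    rw [Finset.disjoint_left]
    intro q hq hq'
    simp only [List.mem_toFinset, PySem.Set.mem_inter, List.mem_filter,
      PySem.Set.mem_symmDiff] at hq hq'
    tauto
  rw [← Finset.card_union_of_disjoint hdisj]
  congr 1
  ext q
  simp only [Finset.mem_union, List.mem_toFinset, PySem.Set.mem_inter, List.mem_filter,
    PySem.Set.mem_symmDiff, Bool.and_eq_true, Bool.not_eq_true',
    PySem.Set.contains_eq_listContains, List.contains_eq_mem, decide_eq_true_eq,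
    decide_eq_false_iff_not, hUm q, hfB q]
  constructor
  · rintro (⟨h1, h2⟩ | ⟨⟨h1, h2⟩ | ⟨h1, h2⟩, h3, h4⟩)
    · obtain ⟨a1, a2⟩ := hTM q h1
      obtain ⟨b1, b2⟩ := hPM q h2
      exact ⟨Or.inl h1, a1, b1, a2, b2⟩
    · obtain ⟨a1, a2⟩ := hTM q h1
      refine ⟨Or.inl h1, a1, ?_, a2, ?_⟩ <;> tauto
    · obtain ⟨b1, b2⟩ := hPM q h1
      refine ⟨Or.inr h1, ?_, b1, ?_, b2⟩ <;> tauto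
  · rintro ⟨h1 | h1, c1, c2, d1, d2⟩
    · by_cases h2 : q ∈ PA
      · exact Or.inl ⟨h1, h2⟩
      · exact Or.inr ⟨Or.inl ⟨h1, h2⟩, by tauto, by tauto⟩
    · by_cases h2 : q ∈ TA
      · exact Or.inl ⟨h2, h1⟩
      · exact Or.inr ⟨Or.inr ⟨h1, h2⟩, by tauto, by tauto⟩

-- ===== VERDICT (by name: the statement is the Claim_ definition above) =====
set_option maxHeartbeats 1000000 in
theorem pairwise_negative_spec : Claim_equal_pairwise_negative := by
  intro true_ pred _ hpre
  obtain ⟨hcT, hcP⟩ := hpre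
  unfold Spec_pairwise_negative
  simp only [pairwise_negative, pairwise_negative_alt]
  set tm := pvSetsToMapping true_ with htm
  set pm := pvSetsToMapping pred with hpm
  set ts := pvSeen true_ with hts
  set ps := pvSeen pred with hps
  set TP := pvPositivePairs (List.map (fun x => x.2) true_) with hTPdef
  set PP := pvPositivePairs (List.map (fun x => x.2) pred) with hPPdef
  have hkt : tm.keys = PySem.Set.ofList (true_.flatMap (·.2)) := pv_keys_eq (fun p => p.1) true_
  have hkp : pm.keys = PySem.Set.ofList (pred.flatMap (·.2)) := pv_keys_eq (fun p => p.1) pred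
  have hkts : ts.keys = PySem.Set.ofList (true_.flatMap (·.2)) := pv_keys_eq (fun _ => none) true_
  have hkps : ps.keys = PySem.Set.ofList (pred.flatMap (·.2)) := pv_keys_eq (fun _ => none) pred
  have hCt : ∀ c ∈ true_.map (·.2), c.Nodup := by
    intro c hc
    obtain ⟨p, hp, rfl⟩ := List.mem_map.mp hc
    exact hcT p hp
  have hCp : ∀ c ∈ pred.map (·.2), c.Nodup := by
    intro c hc
    obtain ⟨p, hp, rfl⟩ := List.mem_map.mp hc
    exact hcP p hp
  -- the two within-cluster pair collections agree as sets
  have hTPl : ∀ q, q ∈ pvPairList (true_.map (·.2)) ↔ q ∈ TP := by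
    intro q
    rw [hTPdef, pvPairList, pv_mem_dedup, pvPositivePairs, PySem.Set.mem_ofList]
  have hPPl : ∀ q, q ∈ pvPairList (pred.map (·.2)) ↔ q ∈ PP := by
    intro q
    rw [hPPdef, pvPairList, pv_mem_dedup, pvPositivePairs, PySem.Set.mem_ofList]
  have hTPnd : TP.Nodup := PySem.Set.nodup_ofList _
  have hPPnd : PP.Nodup := PySem.Set.nodup_ofList _
  have hlenT : (pvPairList (true_.map (·.2))).length = TP.length :=
    ((List.perm_ext_iff_of_nodup (pv_dedup_nodup _) hTPnd).mpr hTPl).length_eq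
  have hlenP : (pvPairList (pred.map (·.2))).length = PP.length :=
    ((List.perm_ext_iff_of_nodup (pv_dedup_nodup _) hPPnd).mpr hPPl).length_eq
  -- n_common agrees
  have hnc : (PySem.Set.inter tm.keys pm.keys).length
      = ts.keys.countP (fun m => ps.contains m) := by
    rw [List.countP_eq_length_filter]
    have hkeq : ts.keys = tm.keys := by rw [hkts, hkt]
    rw [hkeq]
    show (tm.keys.filter (fun m => PySem.Set.contains pm.keys m)).length = _
    congr 1
    apply List.filter_congr
    intro m _
    by_cases hm : m ∈ pred.flatMap (·.2)
    · rw [(PySem.Set.contains_iff pm.keys m).mpr (by rw [hkp]; exact (PySem.Set.mem_ofList _ m).mpr hm),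
        (PySem.Dict.contains_iff_mem_keys ps m).mpr (by rw [hkps]; exact (PySem.Set.mem_ofList _ m).mpr hm)]
    · have h1 : PySem.Set.contains pm.keys m = false := by
        rw [Bool.eq_false_iff]
        intro hc
        have := (PySem.Set.contains_iff pm.keys m).mp hc
        rw [hkp] at this
        exact hm ((PySem.Set.mem_ofList _ m).mp this)
      have h2 : ps.contains m = false := by
        rw [Bool.eq_false_iff]
        intro hc
        have := (PySem.Dict.contains_iff_mem_keys ps m).mp hc
        rw [hkps] at this
        exact hm ((PySem.Set.mem_ofList _ m).mp this)
      rw [h1, h2]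
  -- the union list B counts over
  have hU : (pvDedupSorted (pvPairList (true_.map (·.2)) ++ pvPairList (pred.map (·.2)))).Nodup :=
    pv_dedup_nodup _
  have hUm : ∀ q, q ∈ pvDedupSorted (pvPairList (true_.map (·.2)) ++ pvPairList (pred.map (·.2)))
      ↔ q ∈ TP ∨ q ∈ PP := by
    intro q
    rw [pv_mem_dedup, List.mem_append, hTPl q, hPPl q]
  -- endpoints of each side's pairs lie in that side's mentions
  have hTM : ∀ q ∈ TP, q.1 ∈ tm.keys ∧ q.2 ∈ tm.keys := by
    intro q hq
    obtain ⟨c, hc, h1, h2, _⟩ := (pv_mem_positivePairs _ hCt q).mp hq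
    obtain ⟨p, hp, rfl⟩ := List.mem_map.mp hc
    rw [hkt]
    exact ⟨(PySem.Set.mem_ofList _ _).mpr (List.mem_flatMap.mpr ⟨p, hp, h1⟩),
      (PySem.Set.mem_ofList _ _).mpr (List.mem_flatMap.mpr ⟨p, hp, h2⟩)⟩
  have hPM : ∀ q ∈ PP, q.1 ∈ pm.keys ∧ q.2 ∈ pm.keys := by
    intro q hq
    obtain ⟨c, hc, h1, h2, _⟩ := (pv_mem_positivePairs _ hCp q).mp hq
    obtain ⟨p, hp, rfl⟩ := List.mem_map.mp hc
    rw [hkp]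
    exact ⟨(PySem.Set.mem_ofList _ _).mpr (List.mem_flatMap.mpr ⟨p, hp, h1⟩),
      (PySem.Set.mem_ofList _ _).mpr (List.mem_flatMap.mpr ⟨p, hp, h2⟩)⟩
  -- B's membership predicate reads exactly "both mentions common"
  have hfB : ∀ q : String × String,
      (ts.contains q.1 && ps.contains q.1 && ts.contains q.2 && ps.contains q.2) = true ↔
        (q.1 ∈ tm.keys ∧ q.1 ∈ pm.keys ∧ q.2 ∈ tm.keys ∧ q.2 ∈ pm.keys) := by
    intro q
    simp only [Bool.and_eq_true, PySem.Dict.contains_iff_mem_keys]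
    rw [hkts, hkps, hkt, hkp]
    tauto
  have hcount := pv_count TP PP
    (pvDedupSorted (pvPairList (true_.map (·.2)) ++ pvPairList (pred.map (·.2))))
    tm.keys pm.keys hTPnd hPPnd hU hUm
    (fun q => ts.contains q.1 && ps.contains q.1 && ts.contains q.2 && ps.contains q.2)
    hfB hTM hPM
  -- A's disagreements set is already duplicate-free
  have hofl : PySem.Set.ofList ((PySem.Set.symmDiff TP PP).filter
      (fun p => !(PySem.Set.contains (PySem.Set.symmDiff tm.keys pm.keys) p.1)
        && !(PySem.Set.contains (PySem.Set.symmDiff tm.keys pm.keys) p.2)))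
      = (PySem.Set.symmDiff TP PP).filter
      (fun p => !(PySem.Set.contains (PySem.Set.symmDiff tm.keys pm.keys) p.1)
        && !(PySem.Set.contains (PySem.Set.symmDiff tm.keys pm.keys) p.2)) :=
    PySem.Set.ofList_eq_self_of_nodup _
      (List.Nodup.filter _ (PySem.Set.nodup_symmDiff _ _ hTPnd hPPnd))
  -- sizes agree
  have hsz_t : tm.size = ts.size := by
    rw [pv_size_eq_keys_length, pv_size_eq_keys_length, hkt, hkts]
  have hsz_p : pm.size = ps.size := by
    rw [pv_size_eq_keys_length, pv_size_eq_keys_length, hkp, hkps]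
  refine congrArg₂ Prod.mk ?_ (congrArg₂ Prod.mk ?_ (congrArg₂ Prod.mk ?_ ?_))
  · rw [hofl, hnc]
    omega
  · rw [hsz_p, hlenP]
  · rw [hofl, hnc]
    omega
  · rw [hsz_t, hlenT]
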